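-- pv_equiv track=rewrite | github.com/atgiannako/NeuroNER | src/utils_nlp.py | bio_to_bioes
-- ===== SOURCE A (Python) =====
-- def remove_bio_from_label_name(label_name):
--     if label_name[:2] in ['B-', 'I-', 'E-', 'S-']:
--         new_label_name = label_name[2:]
--     else:
--         new_label_name = label_name
--     return new_label_name
--
-- def end_current_entity(previous_label_without_bio, current_entity_length, new_labels, i):
--     '''
--     Helper function for bio_to_bioes
--     '''
--     if current_entity_length == 0:
--         return
--     if current_entity_length == 1:
--         new_labels[i - 1] = 'S-' + previous_label_without_bio
--     else: #elif current_entity_length > 1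
--         new_labels[i - 1] = 'E-' + previous_label_without_bio
--
-- def bio_to_bioes(labels):
--     previous_label_without_bio = 'O'
--     current_entity_length = 0
--     new_labels = labels.copy()
--     for i, label in enumerate(labels):
--         label_without_bio = remove_bio_from_label_name(label)
--         # end the entity
--         if current_entity_length > 0 and (label[:2] in ['B-', 'O'] or label[:2] == 'I-' and previous_label_without_bio != label_without_bio):
--             end_current_entity(previous_label_without_bio, current_entity_length, new_labels, i)
--             current_entity_length = 0
--         if label[:2] == 'B-':
--             current_entity_length = 1
--         elif label[:2] == 'I-':
--             if current_entity_length == 0: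
--                 new_labels[i] = 'B-' + label_without_bio
--             current_entity_length += 1
--         previous_label_without_bio = label_without_bio
--     end_current_entity(previous_label_without_bio, current_entity_length, new_labels, i + 1)
--     return new_labels
-- ===== SOURCE B (Python) =====
-- def _strip_bio(label):
--     return label[2:] if label[:2] in ('B-', 'I-', 'E-', 'S-') else label
--
-- def _ends_before(label, prev_wo_bio):
--     # does A's "end the entity" condition fire when `label` arrives after an open entity?
--     p2 = label[:2]
--     return p2 in ('B-', 'O') or (p2 == 'I-' and prev_wo_bio != _strip_bio(label))
--
-- def bio_to_bioes(labels):
--     # single forward pass with one-token lookahead: each output tag is decided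
--     # immediately from the current label and its successor; no retroactive edits.
--     out = []
--     prev = 'O'
--     cur = 0
--     n = len(labels)
--     for j, lab in enumerate(labels):
--         lw = _strip_bio(lab)
--         p2 = lab[:2]
--         cur1 = 0 if (cur > 0 and _ends_before(lab, prev)) else cur
--         if p2 == 'B-':
--             cur2 = 1
--         elif p2 == 'I-':
--             cur2 = cur1 + 1
--         else:
--             cur2 = cur1
--         ends_here = cur2 > 0 and (j + 1 == n or _ends_before(labels[j + 1], lw))
--         if ends_here:
--             out.append(('S-' if cur2 == 1 else 'E-') + lw)
--         elif p2 == 'I-' and cur1 == 0: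
--             out.append('B-' + lw)
--         else:
--             out.append(lab)
--         prev = lw
--         cur = cur2
--     return out
-- ===== Notes on version B (the rewrite author's own statement) =====
-- stated objective: alternative
-- what changed: A maintains an entity-length counter and retroactively backpatches new_labels[i-1] (plus a final patch after the loop); B is a single forward pass that decides each output tag immediately from the current label, the running state and a one-token lookahead at the next label, never editing previously emitted output.
import Mathlib
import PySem

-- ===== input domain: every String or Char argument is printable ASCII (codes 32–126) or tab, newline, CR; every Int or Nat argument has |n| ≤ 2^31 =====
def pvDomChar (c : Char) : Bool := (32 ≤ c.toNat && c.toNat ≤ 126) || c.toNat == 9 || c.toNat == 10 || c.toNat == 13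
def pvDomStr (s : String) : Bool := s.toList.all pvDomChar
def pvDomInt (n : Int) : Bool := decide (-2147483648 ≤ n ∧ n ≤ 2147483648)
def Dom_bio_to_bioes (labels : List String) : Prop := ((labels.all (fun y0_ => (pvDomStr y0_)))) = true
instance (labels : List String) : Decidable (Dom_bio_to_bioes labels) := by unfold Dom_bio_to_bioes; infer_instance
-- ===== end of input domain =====

-- B replaces A's backpatching pass (which edits the previous slot retroactively) by a
-- one-token-lookahead pass that decides each output tag immediately; same return value on
-- every nonempty input (A raises NameError on [], B returns []).

-- ===== PORT A =====

-- label[:2]  (Python slice on a str)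
def pvTake2 (s : String) : String := PySem.Str.slice s none (some 2)

def remove_bio_from_label_name (label : String) : String :=
  if pvTake2 label ∈ (["B-", "I-", "E-", "S-"] : List String) then
    PySem.Str.slice label (some 2) none
  else label

-- end_current_entity patches new_labels[i-1]; the call sites guarantee 1 ≤ i whenever
-- current_entity_length > 0, so Nat subtraction i-1 is exact here.
def end_current_entity (previous_label_without_bio : String) (current_entity_length : Nat)
    (new_labels : List String) (i : Nat) : List String :=
  if current_entity_length == 0 then new_labels
  else if current_entity_length == 1 then
    new_labels.set (i - 1) ("S-" ++ previous_label_without_bio)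
  else
    new_labels.set (i - 1) ("E-" ++ previous_label_without_bio)

-- the `for i, label in enumerate(labels)` loop, recursion carrying the index i and the state
def bioALoop : List String → Nat → String → Nat → List String → String × Nat × List String
  | [], _, prev, cur, nl => (prev, cur, nl)
  | label :: rest, i, prev, cur, nl =>
    let lw := remove_bio_from_label_name label
    -- end the entity
    let p : Nat × List String :=
      if decide (0 < cur) &&
          (pvTake2 label == "B-" || pvTake2 label == "O" ||
            (pvTake2 label == "I-" && prev != lw)) then
        (0, end_current_entity prev cur nl i)
      else (cur, nl)
    let q : Nat × List String :=
      if pvTake2 label == "B-" then (1, p.2)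
      else if pvTake2 label == "I-" then
        (p.1 + 1, if p.1 == 0 then p.2.set i ("B-" ++ lw) else p.2)
      else p
    bioALoop rest (i + 1) lw q.1 q.2

-- final `end_current_entity(..., i + 1)`: for nonempty input the last loop index i is
-- labels.length - 1, so i + 1 = labels.length (empty input raises in Python; Pre_ excludes it)
def bio_to_bioes (labels : List String) : List String :=
  let r := bioALoop labels 0 "O" 0 labels
  end_current_entity r.1 r.2.1 r.2.2 labels.length

-- ===== PORT B =====

def stripBio (label : String) : String :=
  if pvTake2 label ∈ (["B-", "I-", "E-", "S-"] : List String) then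
    PySem.Str.slice label (some 2) none
  else label

-- does A's "end the entity" condition fire when `label` arrives after an open entity?
def endsBefore (label prev : String) : Bool :=
  pvTake2 label == "B-" || pvTake2 label == "O" ||
    (pvTake2 label == "I-" && prev != stripBio label)

-- one forward pass, state (prev, cur); each tag decided from the current label and a peek
-- at the next one, nothing is edited after being emitted
def bioBLoop (prev : String) (cur : Nat) : List String → List String
  | [] => []
  | lab :: rest =>
    let lw := stripBio lab
    let cur1 := if decide (0 < cur) && endsBefore lab prev then 0 else cur
    let cur2 := if pvTake2 lab == "B-" then 1
                else if pvTake2 lab == "I-" then cur1 + 1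
                else cur1
    let endsHere := decide (0 < cur2) &&
      (match rest with | [] => true | nxt :: _ => endsBefore nxt lw)
    let out := if endsHere then (if cur2 == 1 then "S-" ++ lw else "E-" ++ lw)
               else if pvTake2 lab == "I-" && cur1 == 0 then "B-" ++ lw
               else lab
    out :: bioBLoop lw cur2 rest

def bio_to_bioes_alt (labels : List String) : List String :=
  bioBLoop "O" 0 labels

-- ===== PRECONDITION & SPEC =====
-- Pre_ excludes only the empty list, on which A raises NameError (it reads the loop
-- variable i after a loop that never ran); B's natural behaviour there is to return [].
def Pre_bio_to_bioes (labels : List String) : Prop := labels ≠ []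
instance (labels : List String) : Decidable (Pre_bio_to_bioes labels) := by
  unfold Pre_bio_to_bioes; infer_instance

def pvWitness_bio_to_bioes : List String := ["B-PER", "I-PER", "O", "I-LOC"]

def Spec_bio_to_bioes (labels : List String) (out : List String) : Prop :=
  out = bio_to_bioes_alt labels
instance (labels : List String) (out : List String) : Decidable (Spec_bio_to_bioes labels out) := by
  unfold Spec_bio_to_bioes; infer_instance

-- ===== CLAIM (what is proved, stated in full; the proofs are below) =====
def Claim_equal_bio_to_bioes : Prop :=
  ∀ (labels : List String), Dom_bio_to_bioes labels → Pre_bio_to_bioes labels →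
    Spec_bio_to_bioes labels (bio_to_bioes labels)

-- ===== LEMMAS AND PROOFS =====

-- the S-/E- tag A's end_current_entity writes for an open entity of length cur (0 < cur)
def tagOf (cur : Nat) (prev : String) : String :=
  if cur == 1 then "S-" ++ prev else "E-" ++ prev

-- canonical spelling of the "end the entity" condition (B's endsBefore is this Bool
-- expression, with stripBio in place of remove_bio_from_label_name)
lemma endsBefore_eq (lab p : String) :
    endsBefore lab p = (pvTake2 lab == "B-" || pvTake2 lab == "O" ||
      (pvTake2 lab == "I-" && p != remove_bio_from_label_name lab)) := rfl

lemma strip_eq (lab : String) : stripBio lab = remove_bio_from_label_name lab := rfl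

lemma not_I_of_B (lab : String) (hB : (pvTake2 lab == "B-") = true) :
    (pvTake2 lab == "I-") = false := by
  rcases h2 : pvTake2 lab == "I-" with _ | _
  · rfl
  · exfalso
    have e1 : pvTake2 lab = "B-" := by simpa using hB
    have e2 : pvTake2 lab = "I-" := by simpa using h2
    rw [e1] at e2; exact absurd e2 (by decide)

-- the state-update components of one loop iteration, shared by the lemma statements
def cur1F (prev : String) (cur : Nat) (lab : String) : Nat :=
  if decide (0 < cur) && endsBefore lab prev then 0 else cur
def cur2F (prev : String) (cur : Nat) (lab : String) : Nat :=
  if pvTake2 lab == "B-" then 1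
  else if pvTake2 lab == "I-" then cur1F prev cur lab + 1
  else cur1F prev cur lab
def pendF (prev : String) (cur : Nat) (lab : String) : String :=
  if pvTake2 lab == "I-" && cur1F prev cur lab == 0 then "B-" ++ stripBio lab else lab
-- what A's backpatch writes into the previous slot at this iteration (pend if nothing ends)
def emitF (prev : String) (cur : Nat) (pend lab : String) : String :=
  if decide (0 < cur) && endsBefore lab prev then tagOf cur prev else pend

-- B's loop in "pending" form: `pend` is the not-yet-emitted candidate output for the
-- previous position; used only by the proofs as the common shape of both loops.
def loopB2 (prev : String) (cur : Nat) (pend : String) : List String → List String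
  | [] => [if decide (0 < cur) then tagOf cur prev else pend]
  | lab :: rest =>
    emitF prev cur pend lab ::
      loopB2 (stripBio lab) (cur2F prev cur lab) (pendF prev cur lab) rest

lemma bioB_eq_loopB2 (l : List String) : ∀ (prev : String) (cur : Nat) (lab : String),
    bioBLoop prev cur (lab :: l) =
      loopB2 (stripBio lab) (cur2F prev cur lab) (pendF prev cur lab) l := by
  induction l with
  | nil =>
    intro prev cur lab
    simp only [bioBLoop, loopB2, cur1F, cur2F, pendF, tagOf, Bool.and_true,
      endsBefore_eq, strip_eq]
  | cons nxt rest ih =>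
    intro prev cur lab
    simp only [bioBLoop, loopB2, cur1F, cur2F, pendF, emitF, tagOf, endsBefore_eq, strip_eq]
    exact congrArg _ (ih _ _ _)

lemma end_current_entity_mid (prev : String) (cur : Nat) (a : List String) (b : String)
    (c : List String) :
    end_current_entity prev cur (a ++ b :: c) (a.length + 1) =
      a ++ (if decide (0 < cur) then tagOf cur prev else b) :: c := by
  unfold end_current_entity tagOf
  rcases cur with _ | cur
  · simp
  · rcases cur with _ | cur <;> simp

-- A's single loop iteration as one function of the state (definitionally the body of bioALoop)
def stepA (prev : String) (cur : Nat) (nl : List String) (i : Nat) (label : String) :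
    Nat × List String :=
  let lw := remove_bio_from_label_name label
  let p : Nat × List String :=
    if decide (0 < cur) &&
        (pvTake2 label == "B-" || pvTake2 label == "O" ||
          (pvTake2 label == "I-" && prev != lw)) then
      (0, end_current_entity prev cur nl i)
    else (cur, nl)
  if pvTake2 label == "B-" then (1, p.2)
  else if pvTake2 label == "I-" then
    (p.1 + 1, if p.1 == 0 then p.2.set i ("B-" ++ lw) else p.2)
  else p

-- A's loop followed by the final end_current_entity call
def runA (l : List String) (i : Nat) (prev : String) (cur : Nat) (nl : List String) (n : Nat) :
    List String :=
  end_current_entity (bioALoop l i prev cur nl).1 (bioALoop l i prev cur nl).2.1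
    (bioALoop l i prev cur nl).2.2 n

lemma runA_cons (lab : String) (rest : List String) (i : Nat) (prev : String) (cur : Nat)
    (nl : List String) (n : Nat) :
    runA (lab :: rest) i prev cur nl n =
      runA rest (i + 1) (remove_bio_from_label_name lab) (stepA prev cur nl i lab).1
        (stepA prev cur nl i lab).2 n := rfl

-- one iteration of A on the list done ++ pend :: lab :: rest, positioned at the pend slot
lemma stepA_eq (prev : String) (cur : Nat) (done : List String) (pend lab : String)
    (rest : List String) :
    stepA prev cur (done ++ pend :: lab :: rest) (done.length + 1) lab =
      (cur2F prev cur lab, (done ++ [emitF prev cur pend lab]) ++ pendF prev cur lab :: rest) := by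
  unfold stepA
  dsimp only
  by_cases h : (decide (0 < cur) &&
      (pvTake2 lab == "B-" || pvTake2 lab == "O" ||
        (pvTake2 lab == "I-" && prev != remove_bio_from_label_name lab))) = true
  · have h2 := h
    rw [Bool.and_eq_true] at h2
    have h0 : 0 < cur := of_decide_eq_true h2.1
    have ee : emitF prev cur pend lab = tagOf cur prev := by
      simp [emitF, endsBefore_eq, h]
    have ec1 : cur1F prev cur lab = 0 := by
      simp [cur1F, endsBefore_eq, h]
    rw [if_pos h, end_current_entity_mid, if_pos (decide_eq_true h0)]
    dsimp only
    by_cases hB : (pvTake2 lab == "B-") = true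
    · have e2 : cur2F prev cur lab = 1 := by simp [cur2F, hB]
      have ep : pendF prev cur lab = lab := by simp [pendF, not_I_of_B lab hB]
      rw [if_pos hB, e2, ep, ee]; simp
    · by_cases hI : (pvTake2 lab == "I-") = true
      · have e2 : cur2F prev cur lab = 0 + 1 := by simp [cur2F, hB, hI, ec1]
        have ep : pendF prev cur lab = "B-" ++ stripBio lab := by simp [pendF, hI, ec1]
        rw [if_neg hB, if_pos hI, e2, ep, ee, strip_eq]
        simp
      · have e2 : cur2F prev cur lab = 0 := by simp [cur2F, hB, hI, ec1]
        rw [if_neg hB, if_neg hI, e2, ee]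
        have ep : pendF prev cur lab = lab := by simp [pendF, hI]
        rw [ep]; simp
  · have ee : emitF prev cur pend lab = pend := by
      simp only [emitF, endsBefore_eq]
      rw [if_neg h]
    have ec1 : cur1F prev cur lab = cur := by
      simp only [cur1F, endsBefore_eq]
      rw [if_neg h]
    rw [if_neg h]
    dsimp only
    by_cases hB : (pvTake2 lab == "B-") = true
    · have e2 : cur2F prev cur lab = 1 := by simp [cur2F, hB]
      have ep : pendF prev cur lab = lab := by simp [pendF, not_I_of_B lab hB]
      rw [if_pos hB, e2, ep, ee]; simp
    · by_cases hI : (pvTake2 lab == "I-") = true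
      · have e2 : cur2F prev cur lab = cur + 1 := by simp [cur2F, hB, hI, ec1]
        by_cases h0 : (cur == 0) = true
        · have ep : pendF prev cur lab = "B-" ++ stripBio lab := by
            simp [pendF, hI, ec1, h0]
          rw [if_neg hB, if_pos hI, e2, ep, ee, strip_eq, if_pos h0]
          simp
        · have ep : pendF prev cur lab = lab := by simp [pendF, hI, ec1, h0]
          rw [if_neg hB, if_pos hI, e2, ep, ee, if_neg h0]
          simp
      · have e2 : cur2F prev cur lab = cur := by simp [cur2F, hB, hI, ec1]
        rw [if_neg hB, if_neg hI, e2, ee]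
        have ep : pendF prev cur lab = lab := by simp [pendF, hI]
        rw [ep]; simp

lemma bioA_eq_loopB2 (l : List String) : ∀ (done : List String) (pend prev : String) (cur : Nat),
    runA l (done.length + 1) prev cur (done ++ pend :: l) (done.length + 1 + l.length) =
      done ++ loopB2 prev cur pend l := by
  induction l with
  | nil =>
    intro done pend prev cur
    show end_current_entity prev cur (done ++ [pend]) (done.length + 1 + 0) = _
    rw [Nat.add_zero]
    exact end_current_entity_mid prev cur done pend []
  | cons lab rest ih =>
    intro done pend prev cur
    rw [runA_cons, stepA_eq]
    dsimp only
    have key := ih (done ++ [emitF prev cur pend lab]) (pendF prev cur lab) (stripBio lab)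
      (cur2F prev cur lab)
    rw [show (done ++ [emitF prev cur pend lab]).length = done.length + 1 by simp] at key
    rw [show done.length + 1 + (lab :: rest).length = done.length + 1 + 1 + rest.length by
      simp [List.length_cons]; omega]
    rw [show (loopB2 prev cur pend (lab :: rest) : List String) =
      emitF prev cur pend lab ::
        loopB2 (stripBio lab) (cur2F prev cur lab) (pendF prev cur lab) rest from rfl]
    rw [show done ++ emitF prev cur pend lab ::
          loopB2 (stripBio lab) (cur2F prev cur lab) (pendF prev cur lab) rest =
        (done ++ [emitF prev cur pend lab]) ++
          loopB2 (stripBio lab) (cur2F prev cur lab) (pendF prev cur lab) rest by simp]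
    exact key

-- the first iteration of A's loop (i = 0, cur = 0: no entity to end)
lemma stepA_zero (lab : String) (rest : List String) :
    stepA "O" 0 (lab :: rest) 0 lab = (cur2F "O" 0 lab, pendF "O" 0 lab :: rest) := by
  unfold stepA
  by_cases hB : (pvTake2 lab == "B-") = true
  · simp [cur2F, cur1F, pendF, endsBefore, strip_eq, hB, not_I_of_B lab hB]
  · by_cases hI : (pvTake2 lab == "I-") = true
    · simp [cur2F, cur1F, pendF, endsBefore, strip_eq, hB, hI]
    · simp [cur2F, cur1F, pendF, endsBefore, strip_eq, hB, hI]

-- ===== VERDICT (by name: the statement is the Claim_ definition above) =====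
theorem bio_to_bioes_spec : Claim_equal_bio_to_bioes := by
  intro labels _hdom hpre
  unfold Spec_bio_to_bioes
  rcases labels with _ | ⟨lab, rest⟩
  · exact absurd rfl hpre
  · show runA (lab :: rest) 0 "O" 0 (lab :: rest) (lab :: rest).length =
      bio_to_bioes_alt (lab :: rest)
    unfold bio_to_bioes_alt
    rw [bioB_eq_loopB2, runA_cons, stepA_zero]
    dsimp only
    have key := bioA_eq_loopB2 rest [] (pendF "O" 0 lab) (stripBio lab) (cur2F "O" 0 lab)
    simp only [List.length_nil, List.nil_append, Nat.zero_add] at key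
    rw [show (lab :: rest).length = 1 + rest.length by simp [List.length_cons]; omega]
    rw [show (0 : Nat) + 1 = 1 from rfl]
    exact key
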